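-- pv_equiv track=rewrite | github.com/hzzhou01/HD-LoA-Prompting | HD_LoA/RAMS/data/prompt_generator.py | insert_trigger_tags
-- ===== SOURCE A (Python) =====
-- def insert_trigger_tags(sentences, tri_index):
--     """Insert special trigger tags around the trigger word in sentences."""
--     count = -1
--     for i in range(len(sentences)):
--         for j in range(len(sentences[i])):
--             count += 1
--             if count == tri_index:
--                 trigger = sentences[i][j]
--                 # Insert the <t> and </t> tags before and after the word
--                 sentences[i][j] = "<t> " + sentences[i][j] + " </t>"
--     return trigger
-- ===== SOURCE B (Python) =====
-- def insert_trigger_tags(sentences, tri_index):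
--     """Insert special trigger tags around the trigger word and return it.
--
--     Keep a running offset and step over whole rows, indexing the target
--     row directly instead of counting every word.
--     """
--     offset = tri_index
--     for row in sentences:
--         if 0 <= offset < len(row):
--             trigger = row[offset]
--             row[offset] = "<t> " + trigger + " </t>"
--             return trigger
--         offset -= len(row)
-- ===== Notes on version B (the rewrite author's own statement) =====
-- stated objective: alternative
-- what changed: B replaces A's flat word-by-word counter scan over every sentence with a running-offset walk over whole rows that indexes the target row directly and returns early; Pre_ excludes out-of-range or negative tri_index, on which A raises UnboundLocalError (B returns None there).
import Mathlib
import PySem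

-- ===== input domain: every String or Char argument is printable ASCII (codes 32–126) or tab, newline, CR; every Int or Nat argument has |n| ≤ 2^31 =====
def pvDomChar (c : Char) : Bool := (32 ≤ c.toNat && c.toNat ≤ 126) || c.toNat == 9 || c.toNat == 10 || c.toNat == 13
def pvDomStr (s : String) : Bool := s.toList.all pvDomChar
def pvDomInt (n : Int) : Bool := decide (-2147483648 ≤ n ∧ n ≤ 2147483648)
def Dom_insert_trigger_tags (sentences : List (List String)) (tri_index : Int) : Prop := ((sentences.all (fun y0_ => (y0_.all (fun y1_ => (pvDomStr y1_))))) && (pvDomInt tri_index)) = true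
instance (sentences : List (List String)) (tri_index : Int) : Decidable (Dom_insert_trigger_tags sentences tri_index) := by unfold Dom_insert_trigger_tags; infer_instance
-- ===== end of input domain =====

-- B walks rows with a running offset and indexes the target row directly (early return),
-- instead of A's flat word-by-word counter scan; equivalence is about the RETURN value only
-- (both Pythons perform the identical single-cell mutation of `sentences`).

-- ===== PORT A =====
-- A's nested loops over sentences with a flat counter; the trigger variable is an Option
-- (Python's possibly-unbound local); the in-place tagging mutation does not affect the return.
def insert_trigger_tags (sentences : List (List String)) (tri_index : Int) : String :=
  (sentences.foldl
    (fun (acc : Int × Option String) row =>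
      row.foldl
        (fun (acc : Int × Option String) w =>
          let count := acc.1 + 1
          (count, if count = tri_index then some w else acc.2))
        acc)
    (-1, none)).2.getD ""   -- Pre_ guarantees `some`; Python raises UnboundLocalError when `none`

-- ===== PORT B =====
-- B's row walk: if the offset falls inside the current row, return that word; else subtract.
def altGo (rows : List (List String)) (offset : Int) : Option String :=
  match rows with
  | [] => none
  | row :: rest =>
    if 0 ≤ offset ∧ offset < (row.length : Int) then row[offset.toNat]?
    else altGo rest (offset - row.length)

def insert_trigger_tags_alt (sentences : List (List String)) (tri_index : Int) : String :=
  (altGo sentences tri_index).getD ""   -- Pre_ guarantees `some`; B's Python returns None when out of range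

-- ===== PRECONDITION & SPEC =====
-- Pre_ excludes exactly the inputs where Python A raises UnboundLocalError:
-- tri_index negative or ≥ the total number of words.
def Pre_insert_trigger_tags (sentences : List (List String)) (tri_index : Int) : Prop :=
  0 ≤ tri_index ∧ tri_index < (sentences.flatten.length : Int)
instance (sentences : List (List String)) (tri_index : Int) : Decidable (Pre_insert_trigger_tags sentences tri_index) := by unfold Pre_insert_trigger_tags; infer_instance

def pvWitness_insert_trigger_tags : List (List String) × Int := ([["a", "b"], [], ["c"]], 2)

def Spec_insert_trigger_tags (sentences : List (List String)) (tri_index : Int) (out : String) : Prop := out = insert_trigger_tags_alt sentences tri_index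
instance (sentences : List (List String)) (tri_index : Int) (out : String) : Decidable (Spec_insert_trigger_tags sentences tri_index out) := by unfold Spec_insert_trigger_tags; infer_instance

-- ===== CLAIM (what is proved, stated in full; the proofs are below) =====
def Claim_equal_insert_trigger_tags : Prop := ∀ (sentences : List (List String)) (tri_index : Int), Dom_insert_trigger_tags sentences tri_index → Pre_insert_trigger_tags sentences tri_index → Spec_insert_trigger_tags sentences tri_index (insert_trigger_tags sentences tri_index)

-- ===== LEMMAS AND PROOFS =====

-- A's state step over one word.
def stepA (tri_index : Int) (acc : Int × Option String) (w : String) : Int × Option String :=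
  let count := acc.1 + 1
  (count, if count = tri_index then some w else acc.2)

lemma stepA_fold_eq (tri_index : Int) (sentences : List (List String)) (acc : Int × Option String) :
    sentences.foldl
      (fun (acc : Int × Option String) row =>
        row.foldl
          (fun (acc : Int × Option String) w =>
            let count := acc.1 + 1
            (count, if count = tri_index then some w else acc.2))
          acc)
      acc
    = sentences.flatten.foldl (stepA tri_index) acc := by
  rw [List.foldl_flatten]
  rfl

-- If the counter has already passed tri_index, the fold never changes the trigger.
lemma foldA_miss (tri_index : Int) (ws : List String) (c : Int) (t : Option String)
    (h : tri_index ≤ c) : (ws.foldl (stepA tri_index) (c, t)).2 = t := by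
  induction ws generalizing c t with
  | nil => rfl
  | cons w ws ih =>
    simp only [List.foldl_cons, stepA]
    rw [if_neg (by omega)]
    exact ih (c + 1) t (by omega)

-- If tri_index = c + 1 + k with k in range, the fold records word k.
lemma foldA_hit (tri_index : Int) (ws : List String) (c : Int) (t : Option String) (k : ℕ)
    (hk : k < ws.length) (htri : tri_index = c + 1 + k) :
    (ws.foldl (stepA tri_index) (c, t)).2 = some ws[k] := by
  induction ws generalizing c t k with
  | nil => simp at hk
  | cons w ws ih =>
    simp only [List.foldl_cons, stepA]
    cases k with
    | zero =>
      rw [if_pos (by omega)]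
      have := foldA_miss tri_index ws (c + 1) (some w) (by omega)
      simpa using this
    | succ k' =>
      rw [if_neg (by omega)]
      have := ih (c + 1) t k' (by simpa using Nat.lt_of_succ_lt_succ hk)
        (by omega)
      simpa using this

-- B's row walk finds the same flat word.
lemma altGo_hit (rows : List (List String)) (k : ℕ) (hk : k < rows.flatten.length) :
    altGo rows (k : Int) = some rows.flatten[k] := by
  induction rows generalizing k with
  | nil => simp at hk
  | cons row rest ih =>
    simp only [altGo]
    by_cases h : k < row.length
    · rw [if_pos (by constructor <;> omega)]
      simp only [Int.toNat_natCast]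
      rw [List.getElem?_eq_getElem h]
      congr 1
      simp only [List.flatten_cons]
      rw [List.getElem_append_left h]
    · rw [if_neg (by omega)]
      have hk' : k - row.length < rest.flatten.length := by
        simp only [List.flatten_cons, List.length_append] at hk; omega
      have hcast : (k : Int) - (row.length : Int) = ((k - row.length : ℕ) : Int) := by
        omega
      rw [hcast, ih _ hk']
      congr 1
      simp only [List.flatten_cons]
      rw [List.getElem_append_right (by omega)]

-- ===== VERDICT (by name: the statement is the Claim_ definition above) =====
theorem insert_trigger_tags_spec : Claim_equal_insert_trigger_tags := by
  intro sentences tri_index _ hpre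
  obtain ⟨h0, hlt⟩ := hpre
  unfold Spec_insert_trigger_tags insert_trigger_tags insert_trigger_tags_alt
  set k : ℕ := tri_index.toNat with hk
  have hkeq : (k : Int) = tri_index := Int.toNat_of_nonneg h0
  have hklt : k < sentences.flatten.length := by omega
  rw [stepA_fold_eq]
  rw [foldA_hit tri_index sentences.flatten (-1) none k hklt (by omega)]
  rw [← hkeq, altGo_hit sentences k hklt]
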